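-- pv_equiv track=rewrite | github.com/tn-pisama/mao-testing-research | benchmarks/scripts/populate_mast_embeddings.py | extract_ground_truth_failures
-- ===== SOURCE A (Python) =====
-- from typing import Dict, List, Optional
--
-- def extract_ground_truth_failures(trace: Dict) -> Dict[str, bool]:
--     """Extract ground truth failure annotations from MAST trace.
--
--     MAST annotation codes (1.1, 1.2, etc.) map to F1-F14:
--     - 1.1 = F1 (Specification Mismatch)
--     - 1.2 = F2 (Poor Task Decomposition)
--     - 1.3 = F3 (Resource Misallocation)
--     - 1.4 = F4 (Inadequate Tool Provision)
--     - 1.5 = F5 (Flawed Workflow Design)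
--     - 2.1 = F6 (Task Derailment)
--     - 2.2 = F7 (Context Neglect)
--     - 2.3 = F8 (Information Withholding)
--     - 2.4 = F9 (Role Usurpation)
--     - 2.5 = F10 (Communication Breakdown)
--     - 2.6 = F11 (Coordination Failure)
--     - 3.1 = F12 (Output Validation Failure)
--     - 3.2 = F13 (Quality Gate Bypass)
--     - 3.3 = F14 (Completion Misjudgment)
--     """
--     # MAST annotation mapping
--     ANNOTATION_MAP = {
--         "1.1": "F1", "1.2": "F2", "1.3": "F3", "1.4": "F4", "1.5": "F5",
--         "2.1": "F6", "2.2": "F7", "2.3": "F8", "2.4": "F9", "2.5": "F10", "2.6": "F11",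
--         "3.1": "F12", "3.2": "F13", "3.3": "F14",
--     }
--
--     # Get MAST annotations
--     mast_annotation = trace.get('mast_annotation', {})
--
--     # Convert to F1-F14 format
--     failures = {}
--     for i in range(1, 15):
--         failures[f"F{i}"] = False
--
--     for code, value in mast_annotation.items():
--         mode = ANNOTATION_MAP.get(str(code))
--         if mode:
--             # Value is integer (0 or 1)
--             failures[mode] = bool(value)
--
--     return failures
-- ===== SOURCE B (Python) =====
-- def extract_ground_truth_failures(trace):
--     """Single-pass version: normalize annotation keys once, then drive the
--     output by the fixed ANNOTATION_MAP instead of the input dict."""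
--     ANNOTATION_MAP = {
--         "1.1": "F1", "1.2": "F2", "1.3": "F3", "1.4": "F4", "1.5": "F5",
--         "2.1": "F6", "2.2": "F7", "2.3": "F8", "2.4": "F9", "2.5": "F10", "2.6": "F11",
--         "3.1": "F12", "3.2": "F13", "3.3": "F14",
--     }
--     norm = {str(k): v for k, v in trace.get('mast_annotation', {}).items()}
--     return {mode: bool(norm.get(code)) for code, mode in ANNOTATION_MAP.items()}
-- ===== Notes on version B (the rewrite author's own statement) =====
-- stated objective: simpler
-- what changed: B inverts the driving collection: instead of pre-initializing 14 flags to False and then looping over the input annotations to overwrite them, it normalizes the annotation keys once and builds the result in one comprehension over the fixed ANNOTATION_MAP, looking each code up.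
import Mathlib
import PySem

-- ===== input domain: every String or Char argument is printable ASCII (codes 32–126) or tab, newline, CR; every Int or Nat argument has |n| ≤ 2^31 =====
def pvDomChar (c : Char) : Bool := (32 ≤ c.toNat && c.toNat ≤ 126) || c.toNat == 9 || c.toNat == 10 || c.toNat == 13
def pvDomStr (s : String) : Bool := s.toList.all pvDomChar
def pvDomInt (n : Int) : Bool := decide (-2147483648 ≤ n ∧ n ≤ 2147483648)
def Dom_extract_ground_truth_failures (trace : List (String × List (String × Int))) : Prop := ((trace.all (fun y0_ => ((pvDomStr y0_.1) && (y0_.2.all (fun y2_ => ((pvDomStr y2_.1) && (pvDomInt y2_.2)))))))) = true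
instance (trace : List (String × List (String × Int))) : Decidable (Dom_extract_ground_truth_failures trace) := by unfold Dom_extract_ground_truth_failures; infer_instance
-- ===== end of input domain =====

-- B replaces A's initialize-all-to-False-then-overwrite two-phase dict build by a single
-- pass over the fixed ANNOTATION_MAP with a lookup into the normalized annotations (simpler).

-- the ANNOTATION_MAP literal, the constant code table of both ports
def egtfMapList : List (String × String) :=
  [("1.1", "F1"), ("1.2", "F2"), ("1.3", "F3"), ("1.4", "F4"), ("1.5", "F5"),
   ("2.1", "F6"), ("2.2", "F7"), ("2.3", "F8"), ("2.4", "F9"), ("2.5", "F10"), ("2.6", "F11"),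
   ("3.1", "F12"), ("3.2", "F13"), ("3.3", "F14")]

-- ===== PORT A =====
-- literal port: trace.get('mast_annotation', {}); init F1..F14 to False; overwrite from the
-- annotation items. (str(code) on a str key is the identity, so it is dropped in the port.)
def extract_ground_truth_failures (trace : List (String × List (String × Int))) : List (String × Bool) :=
  let ANNOTATION_MAP : PySem.Dict String String := PySem.Dict.mk egtfMapList
  let mast_annotation : List (String × Int) := (PySem.Dict.mk trace).getD "mast_annotation" []
  let failures : PySem.Dict String Bool :=
    (PySem.List.pyRange 1 15 1).foldl
      (fun f i => f.insert ("F" ++ PySem.Int.toStr i) false) PySem.Dict.empty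
  let failures :=
    mast_annotation.foldl
      (fun f p =>
        match ANNOTATION_MAP.get? p.1 with
        | some mode => if mode == "" then f else f.insert mode (p.2 != 0)  -- 'if mode:' truthiness; bool(value) = value != 0
        | none => f)
      failures
  failures.items

-- ===== PORT B =====
-- bool(x) for x : Optional[int]
def egtfPyBool (o : Option Int) : Bool :=
  match o with
  | some v => v != 0
  | none => false

def extract_ground_truth_failures_alt (trace : List (String × List (String × Int))) : List (String × Bool) :=
  let norm : PySem.Dict String Int :=
    ((PySem.Dict.mk trace).getD "mast_annotation" []).foldl
      (fun d p => d.insert p.1 p.2) PySem.Dict.empty   -- {str(k): v for k, v in ...}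
  egtfMapList.map (fun p => (p.2, egtfPyBool (norm.get? p.1)))

-- ===== PRECONDITION & SPEC =====
def Spec_extract_ground_truth_failures (trace : List (String × List (String × Int))) (out : List (String × Bool)) : Prop := out = extract_ground_truth_failures_alt trace
instance (trace : List (String × List (String × Int))) (out : List (String × Bool)) : Decidable (Spec_extract_ground_truth_failures trace out) := by unfold Spec_extract_ground_truth_failures; infer_instance

-- ===== CLAIM (what is proved, stated in full; the proofs are below) =====
def Claim_equal_extract_ground_truth_failures : Prop := ∀ (trace : List (String × List (String × Int))), Dom_extract_ground_truth_failures trace → Spec_extract_ground_truth_failures trace (extract_ground_truth_failures trace)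

-- ===== LEMMAS AND PROOFS =====

-- B's result, as a dict, as a function of the normalized annotation dict
def egtfF (d : PySem.Dict String Int) : PySem.Dict String Bool :=
  PySem.Dict.mk (egtfMapList.map (fun p => (p.2, egtfPyBool (d.get? p.1))))

theorem egtfF_empty :
    (PySem.List.pyRange 1 15 1).foldl
      (fun f i => f.insert ("F" ++ PySem.Int.toStr i) false) PySem.Dict.empty
      = egtfF PySem.Dict.empty := by decide

theorem egtfF_contains (d : PySem.Dict String Int) (m : String) (hm : m ∈ egtfMapList.map (·.2)) :
    (egtfF d).contains m = true := by
  rw [PySem.Dict.contains_eq_decide_mem_keys]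
  simp only [PySem.Dict.keys, egtfF, List.map_map, decide_eq_true_eq]
  exact hm

theorem egtfF_pos (d : PySem.Dict String Int) (v : Int) (c m : String)
    (hcm : (c, m) ∈ egtfMapList) :
    (egtfF d).insert m (v != 0) = egtfF (d.insert c v) := by
  apply PySem.Dict.ext
  rw [PySem.Dict.items_insert_of_contains _ _
        (egtfF_contains d m (List.mem_map.mpr ⟨(c, m), hcm, rfl⟩))]
  fin_cases hcm <;>
    simp [egtfF, egtfMapList, PySem.Dict.get?_insert, egtfPyBool]

theorem egtfF_neg (d : PySem.Dict String Int) (v : Int) (c : String)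
    (hc : c ∉ egtfMapList.map (·.1)) :
    egtfF (d.insert c v) = egtfF d := by
  apply PySem.Dict.ext
  simp only [egtfF]
  refine List.map_congr_left (fun p hp => ?_)
  have hne : p.1 ≠ c := fun e => hc (e ▸ List.mem_map.mpr ⟨p, hp, rfl⟩)
  simp [PySem.Dict.get?_insert, hne]

theorem egtfF_step (d : PySem.Dict String Int) (c : String) (v : Int) :
    (match (PySem.Dict.mk egtfMapList).get? c with
     | some mode => if mode == "" then egtfF d else (egtfF d).insert mode (v != 0)
     | none => egtfF d)
      = egtfF (d.insert c v) := by
  cases heq : (PySem.Dict.mk egtfMapList).get? c with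
  | none =>
    have hc : c ∉ egtfMapList.map (·.1) := by
      have := (PySem.Dict.get?_eq_none_iff_not_mem_keys _ c).mp heq
      simpa [PySem.Dict.keys] using this
    simp [egtfF_neg d v c hc]
  | some m =>
    have hcm : (c, m) ∈ egtfMapList := PySem.Dict.mem_items_of_get?_eq_some _ heq
    have hm : (m == "") = false := by
      have : m ∈ egtfMapList.map (·.2) := List.mem_map.mpr ⟨(c, m), hcm, rfl⟩
      fin_cases this <;> decide
    simp only [hm, Bool.false_eq_true, if_false]
    exact egtfF_pos d v c m hcm

theorem egtfF_fold (l : List (String × Int)) (d : PySem.Dict String Int) :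
    l.foldl
      (fun f p =>
        match (PySem.Dict.mk egtfMapList).get? p.1 with
        | some mode => if mode == "" then f else f.insert mode (p.2 != 0)
        | none => f)
      (egtfF d)
      = egtfF (l.foldl (fun d p => d.insert p.1 p.2) d) := by
  induction l generalizing d with
  | nil => rfl
  | cons p rest ih =>
    simp only [List.foldl_cons]
    rw [egtfF_step d p.1 p.2, ih]

-- ===== VERDICT (by name: the statement is the Claim_ definition above) =====
theorem extract_ground_truth_failures_spec : Claim_equal_extract_ground_truth_failures := by
  intro trace _
  unfold Spec_extract_ground_truth_failures extract_ground_truth_failures extract_ground_truth_failures_alt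
  simp only [egtfF_empty, egtfF_fold]
  rfl
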